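-- pv_equiv track=rewrite | github.com/jwegan/safe_access_py | safe_access.py | _pop_from_path
-- ===== SOURCE A (Python) =====
-- SINGLE_QUOTE = '\x27'
--
-- DOUBLE_QUOTE = '\x22'
--
-- def _pop_from_path(remaining_path):
--   if not remaining_path:
--     return None, None
--
--   end_index = len(remaining_path)
--   str_terminator = None
--   for index, c in enumerate(remaining_path[1:]):
--     if index == 0 and (c == SINGLE_QUOTE or c == DOUBLE_QUOTE):
--       str_terminator = c
--     elif c == str_terminator:
--       str_terminator = None
--     elif not str_terminator and (c == '.' or c == '['):
--       end_index = index + 1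
--       break
--
--   if str_terminator:
--     raise Exception("Invalid path specification: end quote not found")
--   return remaining_path[:end_index], remaining_path[end_index:]
-- ===== SOURCE B (Python) =====
-- SINGLE_QUOTE = '\x27'
--
-- DOUBLE_QUOTE = '\x22'
--
-- def _pop_from_path(remaining_path):
--   if not remaining_path:
--     return None, None
--
--   # phase 1: if position 1 opens a quote, jump past the closing quote
--   start = 1
--   if len(remaining_path) > 1 and remaining_path[1] in (SINGLE_QUOTE, DOUBLE_QUOTE):
--     close = remaining_path.find(remaining_path[1], 2)
--     if close == -1:
--       raise Exception("Invalid path specification: end quote not found")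
--     start = close + 1
--
--   # phase 2: first delimiter at or after start
--   dot = remaining_path.find('.', start)
--   bracket = remaining_path.find('[', start)
--   candidates = [i for i in (dot, bracket) if i != -1]
--   end_index = min(candidates) if candidates else len(remaining_path)
--   return remaining_path[:end_index], remaining_path[end_index:]
-- ===== Notes on version B (the rewrite author's own statement) =====
-- stated objective: simpler
-- what changed: Replaced A's single indexed state-machine loop (str_terminator flag, break) with phased searches: str.find locates the closing quote when position 1 opens one, then the least of two str.find results gives the first delimiter; the C-level find calls replace the per-character Python loop.
import Mathlib
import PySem

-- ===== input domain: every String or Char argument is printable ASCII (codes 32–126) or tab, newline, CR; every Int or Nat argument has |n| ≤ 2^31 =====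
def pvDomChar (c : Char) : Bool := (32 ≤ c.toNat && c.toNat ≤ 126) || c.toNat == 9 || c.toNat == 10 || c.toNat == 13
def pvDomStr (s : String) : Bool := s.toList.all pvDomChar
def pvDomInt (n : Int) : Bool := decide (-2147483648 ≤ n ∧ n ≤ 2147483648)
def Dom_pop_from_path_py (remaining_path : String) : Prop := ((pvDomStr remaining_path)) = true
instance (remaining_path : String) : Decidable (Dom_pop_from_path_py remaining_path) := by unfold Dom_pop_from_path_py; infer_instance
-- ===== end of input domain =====

-- B replaces A's character-by-character state machine with two phased searches (skip the
-- quoted span via find, then take the least of find('.') / find('[')); objective: simpler.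

-- ===== PORT A =====
-- A's for-loop over remaining_path[1:]: state (end_index, str_terminator); the 'break'
-- returns (index + 1, term) immediately.
def popLoopA : List Char → Nat → Nat → Option Char → Nat × Option Char
  | [], _, endIdx, term => (endIdx, term)
  | c :: rest, index, endIdx, term =>
    if index = 0 ∧ (c = '\'' ∨ c = '"') then popLoopA rest (index + 1) endIdx (some c)
    else if some c = term then popLoopA rest (index + 1) endIdx none
    else if term = none ∧ (c = '.' ∨ c = '[') then (index + 1, term)
    else popLoopA rest (index + 1) endIdx term

-- If the loop leaves str_terminator set Python raises; Pre_ excludes exactly those inputs,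
-- so the port just returns the slices.
def pop_from_path_py (remaining_path : String) : Option String × Option String :=
  match remaining_path.toList with
  | [] => (none, none)
  | a :: tail =>
    let cs := a :: tail
    let r := popLoopA tail 0 cs.length none
    (some (String.mk (cs.take r.1)), some (String.mk (cs.drop r.1)))

-- ===== PORT B =====
-- str.find(c, k): first index ≥ k holding c, none for Python's -1.
def findFrom (cs : List Char) (c : Char) (k : Nat) : Option Nat :=
  ((cs.drop k).idxOf? c).map (· + k)

-- min of the two find results, ignoring -1 (none)
def minOptNat : Option Nat → Option Nat → Option Nat
  | some i, some j => some (min i j)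
  | some i, none => some i
  | none, o => o

def pop_from_path_py_alt (remaining_path : String) : Option String × Option String :=
  match remaining_path.toList with
  | [] => (none, none)
  | a :: tail =>
    let cs := a :: tail
    -- phase 1: quote at position 1 → start just past the closing quote (Python raises when
    -- there is none; Pre_ excludes that, the port's value there is immaterial)
    let start : Nat :=
      match tail with
      | c :: rest =>
        if c = '\'' ∨ c = '"' then
          match rest.idxOf? c with
          | some j => j + 3          -- close = j + 2, start = close + 1
          | none => 1
        else 1
      | [] => 1
    -- phase 2: first '.' or '[' at or after start
    let e := (minOptNat (findFrom cs '.' start) (findFrom cs '[' start)).getD cs.length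
    (some (String.mk (cs.take e)), some (String.mk (cs.drop e)))

-- ===== PRECONDITION & SPEC =====
-- Pre_ excludes exactly the unterminated-quote inputs (a quote at position 1 with no matching
-- quote afterwards), on which both A and B raise the same Exception.
def Pre_pop_from_path_py (remaining_path : String) : Prop :=
  (match remaining_path.toList.drop 1 with
   | c :: rest => !((c == '\'' || c == '"') && !(rest.contains c))
   | [] => true) = true

instance (remaining_path : String) : Decidable (Pre_pop_from_path_py remaining_path) := by
  unfold Pre_pop_from_path_py; infer_instance

def pvWitness_pop_from_path_py : String := "a'b.c'.d"

def Spec_pop_from_path_py (remaining_path : String) (out : Option String × Option String) : Prop := out = pop_from_path_py_alt remaining_path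
instance (remaining_path : String) (out : Option String × Option String) : Decidable (Spec_pop_from_path_py remaining_path out) := by unfold Spec_pop_from_path_py; infer_instance

-- ===== CLAIM (what is proved, stated in full; the proofs are below) =====
def Claim_equal_pop_from_path_py : Prop := ∀ (remaining_path : String), Dom_pop_from_path_py remaining_path → Pre_pop_from_path_py remaining_path → Spec_pop_from_path_py remaining_path (pop_from_path_py remaining_path)

-- ===== LEMMAS AND PROOFS =====

def isDelim (c : Char) : Bool := c == '.' || c == '['

-- unquoted scan: from index i ≥ 1 the loop stops at the first '.'/'['
theorem scanNone (cs : List Char) : ∀ (i e : Nat), 1 ≤ i →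
    popLoopA cs i e none =
      (match cs.findIdx? isDelim with
       | some j => (i + j + 1, (none : Option Char))
       | none => (e, none)) := by
  induction cs with
  | nil => intro i e _; simp [popLoopA]
  | cons c rest ih =>
    intro i e hi
    have h0 : ¬ (i = 0 ∧ (c = '\'' ∨ c = '"')) := by rintro ⟨h, _⟩; omega
    simp only [popLoopA, List.findIdx?_cons, if_neg h0]
    by_cases hd : c = '.' ∨ c = '['
    · have : isDelim c = true := by rcases hd with h | h <;> simp [isDelim, h]
      simp [hd, this]
    · have : isDelim c = false := by
        simp only [isDelim, Bool.or_eq_false_iff, beq_eq_false_iff_ne]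
        exact ⟨fun h => hd (Or.inl h), fun h => hd (Or.inr h)⟩
      rw [ih (i + 1) e (by omega)]
      simp only [this, if_neg (by simp [hd] : ¬ (True ∧ (c = '.' ∨ c = '['))),
        reduceCtorEq, if_false, Bool.false_eq_true]
      cases List.findIdx? isDelim rest <;> simp <;> omega

-- quoted scan: with terminator q set and index ≥ 1 the loop skips to just past the first q
theorem scanQuote (cs : List Char) : ∀ (i e : Nat) (q : Char), 1 ≤ i →
    popLoopA cs i e (some q) =
      (match cs.idxOf? q with
       | some j => popLoopA (cs.drop (j + 1)) (i + j + 1) e none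
       | none => (e, some q)) := by
  induction cs with
  | nil => intro i e q _; simp [popLoopA, List.idxOf?_nil]
  | cons c rest ih =>
    intro i e q hi
    have h0 : ¬ (i = 0 ∧ (c = '\'' ∨ c = '"')) := by rintro ⟨h, _⟩; omega
    simp only [popLoopA, List.idxOf?_cons, if_neg h0]
    by_cases hc : c = q
    · subst hc
      simp
    · have hne : ¬ (some c = some q) := by simp [hc]
      have hbe : (c == q) = false := by simp [hc]
      rw [if_neg hne, if_neg (by simp : ¬ ((some q : Option Char) = none ∧ (c = '.' ∨ c = '['))),
        ih (i + 1) e q (by omega)]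
      simp only [hbe, Bool.false_eq_true, if_false]
      cases List.idxOf? q rest with
      | none => rfl
      | some j =>
        simp only [Option.map_some, List.drop_succ_cons]
        congr 1
        omega

theorem minOptNat_map (x y : Option Nat) (k : Nat) :
    minOptNat (x.map (· + k)) (y.map (· + k)) = (minOptNat x y).map (· + k) := by
  cases x <;> cases y <;> simp [minOptNat] <;> omega

-- the least of the two idxOf?'s is findIdx? of the joint predicate
theorem minIdx (l : List Char) :
    minOptNat (l.idxOf? '.') (l.idxOf? '[') = l.findIdx? isDelim := by
  induction l with
  | nil => simp [minOptNat]
  | cons c rest ih =>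
    simp only [List.idxOf?_cons, List.findIdx?_cons, isDelim]
    by_cases h1 : c = '.'
    · subst h1
      simp only [beq_self_eq_true, if_true, Bool.true_or, if_true]
      cases h : List.idxOf? '[' rest <;> simp [minOptNat, (by decide : ('.' == '[') = false)]
    · have hb1 : (c == '.') = false := by simp [h1]
      by_cases h2 : c = '['
      · subst h2
        simp only [beq_self_eq_true, hb1, Bool.false_or, if_true, if_false, Bool.false_eq_true]
        cases h : List.idxOf? '.' rest <;> simp [minOptNat]
      · have hb2 : (c == '[') = false := by simp [h2]
        simp only [hb1, hb2, Bool.false_or, Bool.false_eq_true, if_false]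
        rw [← ih, minOptNat_map]

-- ===== VERDICT (by name: the statement is the Claim_ definition above) =====
theorem pop_from_path_py_spec : Claim_equal_pop_from_path_py := by
  intro s _ hpre
  unfold Spec_pop_from_path_py pop_from_path_py pop_from_path_py_alt
  unfold Pre_pop_from_path_py at hpre
  cases hl : s.toList with
  | nil => simp only [hl]
  | cons a tail =>
    simp only [hl] at hpre ⊢
    cases tail with
    | nil => simp [popLoopA, findFrom, minOptNat]
    | cons c rest =>
      simp only [List.drop_succ_cons, List.drop_zero] at hpre
      by_cases hq : c = '\'' ∨ c = '"'
      · -- quote at position 1; Pre_ gives a closing quote in rest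
        have hqb : (c == '\'' || c == '"') = true := by
          rcases hq with h | h <;> simp [h]
        have hmem : c ∈ rest := by
          simp only [hqb, Bool.true_and, Bool.not_eq_eq_eq_not, Bool.not_true,
            Bool.not_eq_false'] at hpre
          exact List.contains_iff_mem.mp hpre
        obtain ⟨j, hj⟩ : ∃ j, rest.idxOf? c = some j := by
          cases h : rest.idxOf? c with
          | none => exact absurd (List.idxOf?_eq_none_iff.mp h) (by simp [hmem])
          | some j => exact ⟨j, rfl⟩
        have hdrop : (a :: c :: rest).drop (j + 3) = rest.drop (j + 1) := by
          rw [show j + 3 = (j + 1) + 1 + 1 by ring]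
          simp [List.drop_succ_cons]
        have hstep : popLoopA (c :: rest) 0 (a :: c :: rest).length none
            = popLoopA rest 1 (a :: c :: rest).length (some c) := by
          simp [popLoopA, hq]
        rw [hstep, scanQuote rest 1 _ c (by omega), hj]
        simp only [if_pos hq, hj, findFrom, hdrop, minOptNat_map, minIdx,
          scanNone (rest.drop (j + 1)) (1 + j + 1) _ (by omega)]
        cases List.findIdx? isDelim (rest.drop (j + 1)) with
        | none => simp
        | some k =>
          simp only [Option.map_some, Option.getD_some]
          rw [show 1 + j + 1 + k + 1 = k + (j + 3) by ring]
      · -- no quote: scan from position 1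
        have hstep : popLoopA (c :: rest) 0 (a :: c :: rest).length none
            = if c = '.' ∨ c = '[' then ((1 : Nat), (none : Option Char))
              else popLoopA rest 1 (a :: c :: rest).length none := by
          simp [popLoopA, hq]
        rw [hstep]
        simp only [if_neg hq, findFrom, List.drop_one, List.tail_cons, minOptNat_map, minIdx,
          List.findIdx?_cons]
        by_cases hd : c = '.' ∨ c = '['
        · have hdb : isDelim c = true := by rcases hd with h | h <;> simp [isDelim, h]
          simp [hd, hdb]
        · have hdb : isDelim c = false := by
            simp only [isDelim, Bool.or_eq_false_iff, beq_eq_false_iff_ne]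
            exact ⟨fun h => hd (Or.inl h), fun h => hd (Or.inr h)⟩
          rw [if_neg hd, scanNone rest 1 _ (by omega)]
          simp only [hdb, Bool.false_eq_true, if_false]
          cases List.findIdx? isDelim rest with
          | none => simp
          | some k =>
            simp only [Option.map_some, Option.getD_some]
            rw [show 1 + k + 1 = k + 1 + 1 by ring]
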